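-- pv_equiv track=rewrite | github.com/mittgaurav/Pietone | infinite_monkey_pi.py | fn
-- ===== SOURCE A (Python) =====
-- def fn(string, words):
--     """
--     Given a long string, break
--     it into minimum num groups
--     from given list of strings
--
--     www.youtube.com/watch?v=tOD6g7rF7NA
--     """
--     if not string:
--         return 0  # win in 0 spaces
--
--     if not words:
--         return None  # can't win
--
--     minn = 1000
--
--     # for first char of string, pick
--     # options that match the string.
--     # Then for each of those options
--     # do the same for remaining part
--     # of string and other options. A
--     # Chain of options which returns
--     # the lowest count wins.
--
--     # options matching
--     # first character.
--     char = string[0]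
--     options = [x for x in words if x[0] == char and x == string[0:len(x)]]
--
--     for option in options:
--         # for each option check
--         # remaining options for
--         # remaining part of str
--         rem_string = string[len(option):]
--
--         rem = fn(rem_string, [x for x in words if x != option])
--         if rem is not None:
--             minn = min(minn, 1 + rem)
--
--     return minn
-- ===== SOURCE B (Python) =====
-- def fn(string, words):
--     """Minimum number of words (each usable at most once, by value)
--     consecutively partitioning `string`; memoized search over
--     (suffix, remaining word set) states."""
--     memo = {}
--
--     def solve(s, pool):
--         if not s:
--             return 0
--         if not pool:
--             return None
--         key = (s, pool)
--         if key in memo: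
--             return memo[key]
--         best = 1000
--         for w in sorted(pool):
--             if s.startswith(w):
--                 r = solve(s[len(w):], pool - frozenset((w,)))
--                 if r is not None:
--                     best = min(best, 1 + r)
--         memo[key] = best
--         return best
--
--     return solve(string, frozenset(words))
-- ===== Notes on version B (the rewrite author's own statement) =====
-- stated objective: alternative
-- what changed: B replaces A's plain recursion over the word list with a memoized search over (suffix, frozenset of remaining words) states on a deduplicated pool, so each state is solved at most once.
import Mathlib
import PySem

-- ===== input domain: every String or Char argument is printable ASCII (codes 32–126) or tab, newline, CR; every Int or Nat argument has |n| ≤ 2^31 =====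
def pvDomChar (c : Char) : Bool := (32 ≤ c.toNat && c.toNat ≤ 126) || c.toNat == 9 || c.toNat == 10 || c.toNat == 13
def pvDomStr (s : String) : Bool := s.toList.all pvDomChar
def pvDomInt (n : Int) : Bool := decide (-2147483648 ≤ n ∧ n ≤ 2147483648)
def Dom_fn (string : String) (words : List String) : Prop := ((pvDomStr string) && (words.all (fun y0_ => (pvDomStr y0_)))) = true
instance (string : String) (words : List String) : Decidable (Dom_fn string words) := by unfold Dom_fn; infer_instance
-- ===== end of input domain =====

-- B re-implements A's search as a memoized recursion over (suffix, remaining-word-set) states on a deduplicated pool; equivalence is proved on Pre_ (A raises IndexError when a word is "" and the string is non-empty).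

-- ===== PORT A =====
def fn (string : String) (words : List String) : Option Int :=
  if string = "" then some 0
  else if words = [] then none
  else
    let char := PySem.Str.pyGet? string 0
    let options := words.filter (fun x =>
      PySem.Str.pyGet? x 0 == char &&
      decide (x = PySem.Str.slice string (some 0) (some (PySem.Str.len x))))
    some (options.attach.foldl (fun minn o =>
      let rem_string := PySem.Str.slice string (some (PySem.Str.len o.1)) none
      match fn rem_string (words.filter (fun x => decide (x ≠ o.1))) with
      | some rem => min minn (1 + rem)
      | none => minn) 1000)
termination_by words.length
decreasing_by
  rename_i o
  have hmem : o.1 ∈ words := by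
    have h2 := o.2; simp only [options] at h2
    rw [List.mem_unattach] at h2
    obtain ⟨h, -⟩ := h2
    exact h
  simp only [List.length_unattach]
  have h3 : (List.filter (fun (x : {x // x ∈ words}) => decide ((x : String) ≠ (o : String))) words.attach).length < words.attach.length :=
    List.length_filter_lt_length_iff_exists.mpr ⟨⟨o.1, hmem⟩, List.mem_attach _ _, by simp⟩
  simpa using h3

-- ===== PORT B =====
-- the frozenset pool is modelled canonically as its sorted duplicate-free element list
-- (frozenset equality = set equality = equality of those lists), so `sorted(pool)` is a
-- no-op re-sort and `pool - frozenset((w,))` is `pool.erase w`.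
def solveB (s : String) (pool : List String) (memo : PySem.Dict (String × List String) Int) :
    Option Int × PySem.Dict (String × List String) Int :=
  if s = "" then (some 0, memo)
  else if pool = [] then (none, memo)
  else
    match memo.get? (s, pool) with
    | some v => (some v, memo)
    | none =>
      let res := (PySem.List.sorted pool (fun x => x) false).attach.foldl
        (fun (acc : Int × PySem.Dict (String × List String) Int) w =>
          if PySem.Str.startswith s w.1 then
            match solveB (PySem.Str.slice s (some (PySem.Str.len w.1)) none) (pool.erase w.1) acc.2 with
            | (some r, memo') => (min acc.1 (1 + r), memo')
            | (none, memo') => (acc.1, memo')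
          else acc) (1000, memo)
      (some res.1, res.2.insert (s, pool) res.1)
termination_by pool.length
decreasing_by
  rename_i w _
  have hmem : w.1 ∈ pool := (PySem.List.mem_sorted _ _ _ _).mp w.2
  calc (pool.erase w.1).length < pool.length := by
        rw [List.length_erase_of_mem hmem]
        exact Nat.sub_lt (List.length_pos_of_mem hmem) one_pos

def fn_alt (string : String) (words : List String) : Option Int :=
  (solveB string (PySem.List.sorted (PySem.List.dedup words) (fun x => x) false) PySem.Dict.empty).1

-- ===== PRECONDITION & SPEC =====
-- Pre_ excludes exactly the inputs on which A raises IndexError: a non-empty string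
-- together with a word list containing the empty string "" (the comprehension evaluates ""[0]).
def Pre_fn (string : String) (words : List String) : Prop := string = "" ∨ "" ∉ words
instance (string : String) (words : List String) : Decidable (Pre_fn string words) := by unfold Pre_fn; infer_instance

def pvWitness_fn : String × List String := ("ab", ["a", "b"])

def Spec_fn (string : String) (words : List String) (out : Option Int) : Prop := out = fn_alt string words
instance (string : String) (words : List String) (out : Option Int) : Decidable (Spec_fn string words out) := by unfold Spec_fn; infer_instance

-- ===== CLAIM (what is proved, stated in full; the proofs are below) =====
def Claim_equal_fn : Prop := ∀ (string : String) (words : List String), Dom_fn string words → Pre_fn string words → Spec_fn string words (fn string words)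

-- ===== LEMMAS AND PROOFS =====

-- the memo-free value of B's search: same recursion as solveB, no cache
def G (s : String) (pool : List String) : Option Int :=
  if s = "" then some 0
  else if pool = [] then none
  else
    some ((PySem.List.sorted pool (fun x => x) false).attach.foldl
      (fun (best : Int) w =>
        if PySem.Str.startswith s w.1 then
          match G (PySem.Str.slice s (some (PySem.Str.len w.1)) none) (pool.erase w.1) with
          | some r => min best (1 + r)
          | none => best
        else best) 1000)
termination_by pool.length
decreasing_by
  have hmem : w.1 ∈ pool := (PySem.List.mem_sorted _ _ _ _).mp w.2
  calc (pool.erase w.1).length < pool.length := by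
        rw [List.length_erase_of_mem hmem]
        exact Nat.sub_lt (List.length_pos_of_mem hmem) one_pos

def canon (ws : List String) : List String :=
  PySem.List.sorted (PySem.List.dedup ws) (fun x => x) false

def Good (memo : PySem.Dict (String × List String) Int) : Prop :=
  ∀ s p v, memo.get? (s, p) = some v → G s p = some v

def fmStep (f : String → Option Int) : Int → String → Int :=
  fun b w => match f w with | some r => min b r | none => b

def foldMin (f : String → Option Int) (b : Int) (l : List String) : Int :=
  l.foldl (fmStep f) b

theorem foldMin_cons (f : String → Option Int) (b : Int) (w : String) (l : List String) :
    foldMin f b (w :: l) = foldMin f (match f w with | some r => min b r | none => b) l := rfl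

theorem foldMin_le_init (f : String → Option Int) (b : Int) (l : List String) :
    foldMin f b l ≤ b := by
  induction l generalizing b with
  | nil => exact le_rfl
  | cons w t ih =>
    rw [foldMin_cons]
    cases hf : f w with
    | none => simpa using ih b
    | some r => exact le_trans (ih _) (min_le_left _ _)

theorem foldMin_le_of_mem (f : String → Option Int) (b : Int) {l : List String} {w : String}
    {r : Int} (hw : w ∈ l) (hf : f w = some r) : foldMin f b l ≤ r := by
  induction l generalizing b with
  | nil => cases hw
  | cons a t ih =>
    rw [foldMin_cons]
    rcases List.mem_cons.mp hw with rfl | hw'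
    · rw [hf]
      exact le_trans (foldMin_le_init _ _ _) (min_le_right _ _)
    · cases hf' : f a with
      | none => exact ih _ hw'
      | some r' => exact ih _ hw'

theorem foldMin_cases (f : String → Option Int) (b : Int) (l : List String) :
    foldMin f b l = b ∨ ∃ w ∈ l, ∃ r, f w = some r ∧ foldMin f b l = r := by
  induction l generalizing b with
  | nil => exact Or.inl rfl
  | cons a t ih =>
    rw [foldMin_cons]
    cases hf : f a with
    | none =>
      rcases ih b with h | ⟨w, hw, r, hr, he⟩
      · exact Or.inl h
      · exact Or.inr ⟨w, List.mem_cons_of_mem _ hw, r, hr, he⟩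
    | some r =>
      rcases ih (min b r) with h | ⟨w, hw, r', hr', he⟩
      · rcases le_total b r with hbr | hrb
        · exact Or.inl (by rw [h, min_eq_left hbr])
        · exact Or.inr ⟨a, List.mem_cons_self, r, hf, by rw [h, min_eq_right hrb]⟩
      · exact Or.inr ⟨w, List.mem_cons_of_mem _ hw, r', hr', he⟩

theorem foldMin_congr {f g : String → Option Int} (b : Int) {l : List String}
    (h : ∀ w ∈ l, f w = g w) : foldMin f b l = foldMin g b l := by
  induction l generalizing b with
  | nil => rfl
  | cons a t ih =>
    rw [foldMin_cons, foldMin_cons, h a List.mem_cons_self]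
    exact ih _ (fun w hw => h w (List.mem_cons_of_mem _ hw))

theorem foldMin_mem_eq (f : String → Option Int) (b : Int) {l₁ l₂ : List String}
    (h : ∀ w, w ∈ l₁ ↔ w ∈ l₂) : foldMin f b l₁ = foldMin f b l₂ := by
  have key : ∀ (l l' : List String), (∀ w, w ∈ l → w ∈ l') → foldMin f b l' ≤ foldMin f b l := by
    intro l l' hsub
    rcases foldMin_cases f b l with he | ⟨w, hw, r, hr, he⟩
    · rw [he]; exact foldMin_le_init _ _ _
    · rw [he]; exact foldMin_le_of_mem _ _ (hsub w hw) hr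
  exact le_antisymm (key l₂ l₁ (fun w => (h w).mpr)) (key l₁ l₂ (fun w => (h w).mp))

theorem foldMin_filter (f : String → Option Int) (b : Int) (p : String → Bool) (l : List String) :
    foldMin f b (l.filter p) = foldMin (fun w => if p w then f w else none) b l := by
  induction l generalizing b with
  | nil => rfl
  | cons a t ih =>
    by_cases hp : p a
    · rw [List.filter_cons_of_pos hp, foldMin_cons, foldMin_cons, if_pos hp]
      exact ih _
    · rw [List.filter_cons_of_neg hp, foldMin_cons, if_neg hp]
      exact ih _

theorem foldMin_attach (f : String → Option Int) (b : Int) (l : List String)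
    (F : Int → {x // x ∈ l} → Int)
    (hF : ∀ (b : Int) (w : {x // x ∈ l}), F b w = match f w.1 with | some r => min b r | none => b) :
    l.attach.foldl F b = foldMin f b l := by
  have hFe : F = fun acc t => fmStep f acc t.1 :=
    funext fun b => funext fun w => hF b w
  rw [hFe]
  exact List.foldl_attach (f := fmStep f) (b := b)

theorem pairwise_lt_ext {l₁ l₂ : List String} (h₁ : l₁.Pairwise (· < ·))
    (h₂ : l₂.Pairwise (· < ·)) (h : ∀ x, x ∈ l₁ ↔ x ∈ l₂) : l₁ = l₂ := by
  induction l₁ generalizing l₂ with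
  | nil =>
    cases l₂ with
    | nil => rfl
    | cons b t₂ => exact absurd ((h b).mpr List.mem_cons_self) (List.not_mem_nil)
  | cons a t₁ ih =>
    cases l₂ with
    | nil => exact absurd ((h a).mp List.mem_cons_self) (List.not_mem_nil)
    | cons b t₂ =>
      obtain ⟨ha1, ht₁⟩ := List.pairwise_cons.mp h₁
      obtain ⟨hb1, ht₂⟩ := List.pairwise_cons.mp h₂
      have hab : a = b := by
        rcases List.mem_cons.mp ((h a).mp List.mem_cons_self) with h' | h'
        · exact h'
        · rcases List.mem_cons.mp ((h b).mpr List.mem_cons_self) with h'' | h''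
          · exact h''.symm
          · exact absurd (lt_trans (hb1 a h') (ha1 b h'')) (lt_irrefl b)
      subst hab
      have htails : ∀ x, x ∈ t₁ ↔ x ∈ t₂ := by
        intro x
        constructor
        · intro hx
          rcases List.mem_cons.mp ((h x).mp (List.mem_cons_of_mem _ hx)) with rfl | h'
          · exact absurd (ha1 x hx) (lt_irrefl x)
          · exact h'
        · intro hx
          rcases List.mem_cons.mp ((h x).mpr (List.mem_cons_of_mem _ hx)) with rfl | h'
          · exact absurd (hb1 x hx) (lt_irrefl x)
          · exact h'
      rw [ih ht₁ ht₂ htails]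

theorem mem_canon (ws : List String) (x : String) : x ∈ canon ws ↔ x ∈ ws := by
  unfold canon
  rw [PySem.List.mem_sorted, PySem.List.mem_dedup]

theorem canon_pairwise (ws : List String) : (canon ws).Pairwise (· < ·) := by
  unfold canon
  rw [PySem.List.dedup_eq_ofList]
  exact PySem.List.sorted_ofList_pairwise_lt ws

theorem canon_nil_iff (ws : List String) : canon ws = [] ↔ ws = [] := by
  rw [List.eq_nil_iff_forall_not_mem, List.eq_nil_iff_forall_not_mem]
  exact forall_congr' (fun x => not_congr (mem_canon ws x))

theorem sorted_canon (ws : List String) :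
    PySem.List.sorted (canon ws) (fun x => x) false = canon ws := by
  unfold canon
  exact PySem.List.sorted_sorted _ _

theorem erase_canon {ws : List String} {w : String} (hw : w ∈ ws) :
    (canon ws).erase w = canon (ws.filter (fun x => decide (x ≠ w))) := by
  have hnd : (canon ws).Nodup := (canon_pairwise ws).imp (fun h => LT.lt.ne h)
  refine pairwise_lt_ext ((canon_pairwise ws).sublist (List.erase_sublist)) (canon_pairwise _) ?_
  intro x
  rw [List.Nodup.mem_erase_iff hnd, mem_canon, mem_canon, List.mem_filter]
  simp [and_comm]

theorem prefix_char {s w : String} (hw : w ≠ "") (h : w.toList <+: s.toList) :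
    w.toList[0]? = s.toList[0]? := by
  obtain ⟨t, ht⟩ := h
  rw [← ht]
  have hl : 0 < w.toList.length := by
    cases hwl : w.toList with
    | nil => exact absurd (String.toList_inj.mp (by simp [hwl])) hw
    | cons a l => simp
  rw [List.getElem?_append_left hl]

theorem slice_pref {s w : String} :
    (w = PySem.Str.slice s (some 0) (some (PySem.Str.len w))) ↔ w.toList <+: s.toList := by
  rw [← String.toList_inj]
  simp only [PySem.Str.toList_slice, PySem.Chars.slice_eq_listSlice]
  rw [PySem.Str.len_eq, PySem.List.slice_zero_start, PySem.List.slice_to_natCast,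
    List.prefix_iff_eq_take]

theorem matchA_eq {s w : String} (hw : w ≠ "") :
    ((PySem.Str.pyGet? w 0 == PySem.Str.pyGet? s 0) &&
      decide (w = PySem.Str.slice s (some 0) (some (PySem.Str.len w)))) =
    PySem.Str.startswith s w := by
  apply Bool.eq_iff_iff.mpr
  simp only [Bool.and_eq_true, beq_iff_eq, decide_eq_true_eq, PySem.Str.startswith_eq,
    PySem.Chars.startswith_iff, slice_pref, PySem.Str.pyGet?_eq, PySem.Chars.pyGet?_eq_listPyGet?,
    PySem.List.pyGet?_zero]
  constructor
  · rintro ⟨-, h2⟩; exact h2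
  · intro h; exact ⟨prefix_char hw h, h⟩

theorem solveB_spec : ∀ (n : Nat) (s : String) (pool : List String)
    (memo : PySem.Dict (String × List String) Int), pool.length ≤ n → Good memo →
    (solveB s pool memo).1 = G s pool ∧ Good (solveB s pool memo).2 := by
  intro n
  induction n with
  | zero =>
    intro s pool memo hlen hg
    have hp : pool = [] := List.eq_nil_of_length_eq_zero (Nat.le_zero.mp hlen)
    subst hp
    rw [solveB, G]
    by_cases hs : s = "" <;> simp [hs] <;> exact hg
  | succ n ih =>
    intro s pool memo hlen hg
    by_cases hs : s = ""
    · rw [solveB, G]; simp [hs]; exact hg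
    by_cases hp : pool = []
    · subst hp; rw [solveB, G]; simp [hs]; exact hg
    have hG : G s pool = some ((PySem.List.sorted pool (fun x => x) false).attach.foldl
      (fun (best : Int) w =>
        if PySem.Str.startswith s w.1 then
          match G (PySem.Str.slice s (some (PySem.Str.len w.1)) none) (pool.erase w.1) with
          | some r => min best (1 + r)
          | none => best
        else best) 1000) := by
      rw [G]; rw [if_neg hs, if_neg hp]
    rw [solveB]
    rw [if_neg hs, if_neg hp]
    cases hget : memo.get? (s, pool) with
    | some v =>
      exact ⟨(hg s pool v hget).symm, hg⟩
    | none =>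
      have inner : ∀ (l : List {x // x ∈ PySem.List.sorted pool (fun x => x) false}) (b : Int)
          (m : PySem.Dict (String × List String) Int), Good m →
          (l.foldl (fun (acc : Int × PySem.Dict (String × List String) Int) w =>
            if PySem.Str.startswith s w.1 then
              match solveB (PySem.Str.slice s (some (PySem.Str.len w.1)) none) (pool.erase w.1) acc.2 with
              | (some r, memo') => (min acc.1 (1 + r), memo')
              | (none, memo') => (acc.1, memo')
            else acc) (b, m)).1
            = l.foldl (fun (best : Int) w =>
              if PySem.Str.startswith s w.1 then
                match G (PySem.Str.slice s (some (PySem.Str.len w.1)) none) (pool.erase w.1) with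
                | some r => min best (1 + r)
                | none => best
              else best) b
          ∧ Good (l.foldl (fun (acc : Int × PySem.Dict (String × List String) Int) w =>
            if PySem.Str.startswith s w.1 then
              match solveB (PySem.Str.slice s (some (PySem.Str.len w.1)) none) (pool.erase w.1) acc.2 with
              | (some r, memo') => (min acc.1 (1 + r), memo')
              | (none, memo') => (acc.1, memo')
            else acc) (b, m)).2 := by
        intro l
        induction l with
        | nil => exact fun b m hm => ⟨rfl, hm⟩
        | cons w t iht =>
          intro b m hm
          simp only [List.foldl_cons]
          by_cases hsw : PySem.Str.startswith s w.1
          · have hlen' : (pool.erase w.1).length ≤ n := by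
              have hmem : w.1 ∈ pool := (PySem.List.mem_sorted _ _ _ _).mp w.2
              rw [List.length_erase_of_mem hmem]
              omega
            have hrec := ih (PySem.Str.slice s (some (PySem.Str.len w.1)) none) (pool.erase w.1) m hlen' hm
            rw [if_pos hsw, if_pos hsw]
            rcases hv : solveB (PySem.Str.slice s (some (PySem.Str.len w.1)) none) (pool.erase w.1) m with ⟨v1, m1⟩
            rw [hv] at hrec
            obtain ⟨hv1, hm1⟩ := hrec
            rw [← hv1]
            cases v1 with
            | some r => exact iht _ _ hm1
            | none => exact iht _ _ hm1
          · rw [if_neg hsw, if_neg hsw]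
            exact iht _ _ hm
      obtain ⟨h1, h2⟩ := inner ((PySem.List.sorted pool (fun x => x) false).attach) 1000 memo hg
      refine ⟨by rw [hG]; exact congrArg some h1, ?_⟩
      intro s' p' v' hget'
      rw [PySem.Dict.get?_insert] at hget'
      by_cases he : (s', p') = (s, pool)
      · rw [if_pos he] at hget'
        obtain ⟨rfl, rfl⟩ := Prod.ext_iff.mp he
        injection hget' with hv'
        rw [hG, ← hv', h1]
      · rw [if_neg he] at hget'
        exact h2 _ _ _ hget'

theorem alt_eq_G (s : String) (ws : List String) : fn_alt s ws = G s (canon ws) := by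
  have hg : Good PySem.Dict.empty := by
    intro s' p' v' h
    rw [PySem.Dict.get?_empty] at h
    cases h
  exact (solveB_spec (canon ws).length s (canon ws) PySem.Dict.empty le_rfl hg).1

theorem fn_eq_G : ∀ (n : Nat) (ws : List String), ws.length ≤ n → "" ∉ ws →
    ∀ (s : String), fn s ws = G s (canon ws) := by
  intro n
  induction n with
  | zero =>
    intro ws hlen _ s
    have hw : ws = [] := List.eq_nil_of_length_eq_zero (Nat.le_zero.mp hlen)
    subst hw
    rw [fn, G, show canon ([] : List String) = [] from rfl]
    split_ifs <;> simp_all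
  | succ n ih =>
    intro ws hlen hne s
    by_cases hs : s = ""
    · rw [fn, G]; simp [hs]
    by_cases hw : ws = []
    · subst hw
      rw [fn, G, show canon ([] : List String) = [] from rfl]
      split_ifs <;> simp_all
    have hcnil : canon ws ≠ [] := fun h => hw ((canon_nil_iff ws).mp h)
    rw [fn, G]
    rw [if_neg hs, if_neg hw, if_neg hs, if_neg hcnil, sorted_canon]
    show some _ = some _
    congr 1
    refine Eq.trans (foldMin_attach (fun w => Option.map (fun r => (1:Int) + r)
        (fn (PySem.Str.slice s (some (PySem.Str.len w)) none) (ws.filter (fun x => decide (x ≠ w)))))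
        1000 _ _ ?hA)
      (Eq.trans ?mid (foldMin_attach (fun w => if PySem.Str.startswith s w then Option.map (fun r => (1:Int) + r)
        (G (PySem.Str.slice s (some (PySem.Str.len w)) none) ((canon ws).erase w)) else none)
        1000 (canon ws) _ ?hG).symm)
    case hA =>
      intro b w
      cases h : fn (PySem.Str.slice s (some (PySem.Str.len w.1)) none) (ws.filter (fun x => decide (x ≠ w.1))) <;>
        simp only [h] <;> rfl
    case hG =>
      intro b w
      cases hsw : PySem.Str.startswith s w.1 <;>
        cases h : G (PySem.Str.slice s (some (PySem.Str.len w.1)) none) ((canon ws).erase w.1) <;>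
        simp only [h, hsw] <;> simp
    case mid =>
      rw [foldMin_filter]
      have hcong : ∀ w ∈ ws,
          (if (PySem.Str.pyGet? w 0 == PySem.Str.pyGet? s 0 &&
                decide (w = PySem.Str.slice s (some 0) (some (PySem.Str.len w)))) then
            Option.map (fun r => (1:Int) + r)
              (fn (PySem.Str.slice s (some (PySem.Str.len w)) none) (ws.filter (fun x => decide (x ≠ w))))
          else none)
          = (if PySem.Str.startswith s w then Option.map (fun r => (1:Int) + r)
              (G (PySem.Str.slice s (some (PySem.Str.len w)) none) ((canon ws).erase w)) else none) := by
        intro w hwmem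
        have hwne : w ≠ "" := fun h => hne (h ▸ hwmem)
        rw [matchA_eq hwne]
        by_cases hsw : PySem.Str.startswith s w
        · rw [if_pos hsw, if_pos hsw]
          have hlt : (ws.filter (fun x => decide (x ≠ w))).length ≤ n := by
            have hlt0 : (ws.filter (fun x => decide (x ≠ w))).length < ws.length :=
              List.length_filter_lt_length_iff_exists.mpr ⟨w, hwmem, by simp⟩
            omega
          have hne' : "" ∉ ws.filter (fun x => decide (x ≠ w)) := fun h => hne (List.mem_of_mem_filter h)
          rw [ih _ hlt hne', erase_canon hwmem]
        · rw [if_neg hsw, if_neg hsw]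
      exact (foldMin_congr 1000 hcong).trans (foldMin_mem_eq _ 1000 (fun w => (mem_canon ws w).symm))

-- ===== VERDICT (by name: the statement is the Claim_ definition above) =====
theorem fn_spec : Claim_equal_fn := by
  intro s ws _ hpre
  unfold Spec_fn
  rw [alt_eq_G]
  rcases hpre with hs | hw
  · subst hs; rw [fn, G]; simp
  · exact fn_eq_G ws.length ws le_rfl hw s
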